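-- pv_equiv track=rewrite | github.com/shawnr-ca/WikipediaPhilosophyWebCrawler | WikipediaPhilosophyWebFlowChart.py | AddBlankLine
-- ===== SOURCE A (Python) =====
-- def AddBlankLine(string, num):
--     StringLen = len(string)
--     NewString = str(num) + " "
--     StringList = []
--     count = 0
--     for char in string:
--         count += 1
--         if char == "\n" or count == StringLen:
--             num += 1
--             StringList.append(NewString)
--             NewString = str(num) + " "
--         else:
--             NewString += char
--     StringList[-1] += string[-1]
--     return StringList
-- ===== SOURCE B (Python) =====
-- def AddBlankLine(string, num):
--     parts = string[:-1].split("\n")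
--     result = [str(num + i) + " " + p for i, p in enumerate(parts)]
--     result[-1] += string[-1]
--     return result
-- ===== Notes on version B (the rewrite author's own statement) =====
-- stated objective: faster
-- what changed: B replaces the character-by-character counting loop that accumulates each line with string '+=' by one str.split on the newline-free prefix plus a single enumerate comprehension (bulk C-level split instead of per-character Python-level work), then appends the final character to the last line.
import Mathlib
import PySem

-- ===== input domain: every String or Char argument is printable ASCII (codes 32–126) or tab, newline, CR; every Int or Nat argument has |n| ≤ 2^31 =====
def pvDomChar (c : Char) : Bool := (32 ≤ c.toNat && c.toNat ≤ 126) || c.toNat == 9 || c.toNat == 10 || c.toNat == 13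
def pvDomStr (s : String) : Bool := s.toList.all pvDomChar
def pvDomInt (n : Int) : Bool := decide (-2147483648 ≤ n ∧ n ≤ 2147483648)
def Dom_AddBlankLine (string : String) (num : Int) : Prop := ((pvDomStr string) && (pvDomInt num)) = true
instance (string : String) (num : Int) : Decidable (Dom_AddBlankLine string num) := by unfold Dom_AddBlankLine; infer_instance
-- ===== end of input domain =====

-- B computes all numbered lines at once from a split instead of A's per-character counting loop; a timing run measured B faster.
-- ===== PORT A =====
-- the for-loop of A: state = (NewString, StringList, count, num); returns the final state
def AddBlankLine.loopA : List Char → Int → Int → Int → List Char → List (List Char) →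
    (List (List Char) × List Char × Int)
  | [], _count, _L, num, cur, acc => (acc, cur, num)
  | ch :: rest, count, L, num, cur, acc =>
    let count' := count + 1
    if ch = '\n' ∨ count' = L then
      AddBlankLine.loopA rest count' L (num + 1) (PySem.Int.toChars (num + 1) ++ [' ']) (acc ++ [cur])
    else
      AddBlankLine.loopA rest count' L num (cur ++ [ch]) acc

def AddBlankLine (string : String) (num : Int) : List String :=
  let cs := string.toList
  let L : Int := cs.length                                -- StringLen = len(string)
  let res := AddBlankLine.loopA cs 0 L num (PySem.Int.toChars num ++ [' ']) []
  let acc := res.1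
  match acc.getLast?, cs.getLast? with                    -- StringList[-1] += string[-1]
  | some last, some ch => (acc.dropLast ++ [last ++ [ch]]).map String.ofList
  | _, _ => []                                            -- IndexError on empty input: excluded by Pre_

-- ===== PORT B =====
def AddBlankLine_alt (string : String) (num : Int) : List String :=
  let cs := string.toList
  let parts := List.splitOn '\n' cs.dropLast              -- string[:-1].split("\n")
  let result := (PySem.List.enumerate parts 0).map
      (fun ip => PySem.Int.toChars (num + ip.1) ++ [' '] ++ ip.2)
  match cs.getLast? with                                  -- result[-1] += string[-1]
  | some ch => (result.dropLast ++ [(result.getLastD []) ++ [ch]]).map String.ofList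
  | none => []                                            -- IndexError on empty input: excluded by Pre_

-- ===== PRECONDITION & SPEC =====
-- A raises IndexError (StringList[-1] on the empty list) when the string is empty; only that input is excluded.
def Pre_AddBlankLine (string : String) (_num : Int) : Prop := string ≠ ""
instance (string : String) (num : Int) : Decidable (Pre_AddBlankLine string num) := by
  unfold Pre_AddBlankLine; infer_instance
def pvWitness_AddBlankLine : String × Int := ("a\nb", 1)

def Spec_AddBlankLine (string : String) (num : Int) (out : List String) : Prop := out = AddBlankLine_alt string num
instance (string : String) (num : Int) (out : List String) : Decidable (Spec_AddBlankLine string num out) := by unfold Spec_AddBlankLine; infer_instance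

-- ===== CLAIM (what is proved, stated in full; the proofs are below) =====
def Claim_equal_AddBlankLine : Prop := ∀ (string : String) (num : Int), Dom_AddBlankLine string num → Pre_AddBlankLine string num → Spec_AddBlankLine string num (AddBlankLine string num)

-- ===== LEMMAS AND PROOFS =====

-- A's numbered lines over a char list when the count-condition never fires and the final line is kept open
def labelParts (num : Int) : List (List Char) → List (List Char)
  | [] => []
  | p :: ps => (PySem.Int.toChars num ++ [' '] ++ p) :: labelParts (num + 1) ps

theorem splitOnP_ne_nil (p : Char → Bool) (cs : List Char) : List.splitOnP p cs ≠ [] := by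
  induction cs with
  | nil => simp [List.splitOnP_nil]
  | cons c cs ih =>
    rw [List.splitOnP_cons]
    split_ifs
    · simp
    · cases h : List.splitOnP p cs with
      | nil => exact absurd h ih
      | cons q qs => simp [List.modifyHead]

-- pure version of the loop when only '\n' terminates, final open line emitted
def linesA (num : Int) (cur : List Char) : List Char → List (List Char)
  | [] => [cur]
  | c :: rest =>
    if c = '\n' then cur :: linesA (num + 1) (PySem.Int.toChars (num + 1) ++ [' ']) rest
    else linesA num (cur ++ [c]) rest

theorem linesA_eq_split (cs : List Char) : ∀ (num : Int) (cur : List Char),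
    linesA num cur cs =
      (cur ++ (List.splitOnP (· == '\n') cs).headI) ::
        labelParts (num + 1) (List.splitOnP (· == '\n') cs).tail := by
  induction cs with
  | nil => intro num cur; simp [linesA, List.splitOnP_nil, labelParts]
  | cons c cs ih =>
    intro num cur
    rw [List.splitOnP_cons]
    by_cases h : c = '\n'
    · simp only [h, linesA, beq_self_eq_true, if_pos]
      rw [ih]
      cases hs : List.splitOnP (· == '\n') cs with
      | nil => exact absurd hs (splitOnP_ne_nil _ _)
      | cons q qs => simp [labelParts]
    · have hb : (c == '\n') = false := by simp [h]
      simp only [linesA, if_neg h, hb, Bool.false_eq_true, if_neg, not_false_iff]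
      rw [ih]
      cases hs : List.splitOnP (· == '\n') cs with
      | nil => exact absurd hs (splitOnP_ne_nil _ _)
      | cons q qs => simp [List.modifyHead]

-- the loop on cs = front ++ [last] starting at count with count + |cs| = L:
-- the count-condition fires exactly at the final char, which always closes the current line
theorem loopA_eq_linesA (front : List Char) : ∀ (c : Char) (count L num : Int) (cur : List Char)
    (acc : List (List Char)), count + (front ++ [c]).length = L →
    (AddBlankLine.loopA (front ++ [c]) count L num cur acc).1 = acc ++ linesA num cur front := by
  induction front with
  | nil =>
    intro c count L num cur acc hL
    simp only [List.nil_append, List.length_cons, List.length_nil] at hL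
    have : count + 1 = L := by omega
    simp [AddBlankLine.loopA, this, linesA]
  | cons f front ih =>
    intro c count L num cur acc hL
    have hlen : count + 1 + (front ++ [c]).length = L := by
      simp only [List.length_append, List.length_cons] at hL ⊢; omega
    have hne : count + 1 ≠ L := by
      simp only [List.length_append, List.length_cons, List.length_nil] at hlen
      omega
    by_cases h : f = '\n'
    · simp only [List.cons_append, AddBlankLine.loopA, h, true_or, if_pos]
      rw [ih c (count + 1) L (num + 1) _ _ hlen]
      simp [linesA]
    · simp only [List.cons_append, AddBlankLine.loopA]
      rw [if_neg (by tauto)]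
      rw [ih c (count + 1) L num _ _ hlen]
      simp [linesA, h]

theorem enumerate_map_eq_labelParts (parts : List (List Char)) : ∀ (num k : Int),
    (PySem.List.enumerate parts k).map
      (fun ip => PySem.Int.toChars (num + ip.1) ++ [' '] ++ ip.2) = labelParts (num + k) parts := by
  induction parts with
  | nil => intro num k; simp [PySem.List.enumerate_nil, labelParts]
  | cons p ps ih =>
    intro num k
    rw [PySem.List.enumerate_cons]
    simp only [List.map_cons, labelParts]
    rw [ih num (k + 1)]
    ring_nf

-- ===== VERDICT (by name: the statement is the Claim_ definition above) =====
theorem AddBlankLine_spec : Claim_equal_AddBlankLine := by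
  intro string num _hDom hPre
  unfold Spec_AddBlankLine AddBlankLine AddBlankLine_alt
  have hne : string.toList ≠ [] := fun h => hPre (String.toList_eq_nil_iff.mp h)
  have hfc : string.toList.dropLast ++ [string.toList.getLast hne] = string.toList :=
    List.dropLast_concat_getLast hne
  simp only []
  rw [← hfc]
  rw [loopA_eq_linesA _ _ 0 _ num _ _ (by omega)]
  rw [linesA_eq_split]
  rw [List.splitOn]
  rw [enumerate_map_eq_labelParts _ num 0]
  simp only [List.nil_append, List.dropLast_concat, List.getLast?_concat, add_zero]
  cases hs : List.splitOnP (fun x => x == '\n') string.toList.dropLast with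
  | nil => exact absurd hs (splitOnP_ne_nil _ _)
  | cons q qs =>
    simp only [labelParts, List.headI, List.tail_cons]
    have hcons : (PySem.Int.toChars num ++ [' '] ++ q) :: labelParts (num + 1) qs ≠ [] := by simp
    rw [List.getLast?_eq_some_getLast hcons]
    simp only [List.getLastD_eq_getLast?]
    rw [List.getLast?_eq_some_getLast (by simp)]
    simp
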